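-- pv_equiv track=rewrite | github.com/mouredev/retos-programacion-2023 | Retos/Reto #22 - LA ESPIRAL [Media]/python/klyone.py | generate_spiral_from_side
-- ===== SOURCE A (Python) =====
-- def generate_spiral_from_side(n):
--     str = ""
--     seq_h = 0
--     seq_v = 0
--     horizontal = 1
--     i = n-1
--
--     while i >= 0:
--         if horizontal == 1:
--             str += ("h" * i)
--
--             if seq_h == 0:
--                 str += "d"
--                 seq_h = 1
--             else:
--                 seq_h = 0
--                 str += "U"
--
--             horizontal = 0
--             i = i - 1
--         else:
--             str += ("v" * i)
--
--             if seq_v == 0: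
--                 str += "D"
--                 seq_v = 1
--             else:
--                 str += "u"
--                 seq_v = 0
--             horizontal = 1
--
--     return str
-- ===== SOURCE B (Python) =====
-- def generate_spiral_from_side(n):
--     # Inside-out construction: grow the spiral ring by ring from the centre,
--     # maintaining the current spiral's segment list together with its
--     # marker-swapped twin (d<->U, D<->u), which becomes the tail of the next ring.
--     s, sw = [], []
--     for k in range(n):
--         s, sw = (["h" * k, "d", "v" * (k - 1), ("D" if k else "")] + sw,
--                  ["h" * k, "U", "v" * (k - 1), ("u" if k else "")] + s)
--     return "".join(s)
-- ===== Notes on version B (the rewrite author's own statement) =====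
-- stated objective: alternative
-- what changed: Replaced the outside-in while-loop state machine (horizontal flag, seq_h/seq_v toggles, decrementing i, string +=) by an inside-out ring construction: grow the spiral from the centre, at each step wrapping a new ring around the marker-swapped twin of the previous spiral, maintaining the segment list and its d<->U/D<->u swapped twin as a mutual pair and joining once at the end.
import Mathlib
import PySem

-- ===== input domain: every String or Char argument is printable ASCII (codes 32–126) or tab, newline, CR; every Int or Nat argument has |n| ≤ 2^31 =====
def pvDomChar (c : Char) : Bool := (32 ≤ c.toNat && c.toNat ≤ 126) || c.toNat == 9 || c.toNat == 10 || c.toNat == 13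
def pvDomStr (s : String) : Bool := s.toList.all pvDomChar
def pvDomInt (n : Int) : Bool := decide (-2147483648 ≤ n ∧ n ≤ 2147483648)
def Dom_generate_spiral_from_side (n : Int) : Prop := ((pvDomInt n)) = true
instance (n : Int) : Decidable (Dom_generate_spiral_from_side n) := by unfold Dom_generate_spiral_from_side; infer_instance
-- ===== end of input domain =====

-- B replaces A's outside-in while-loop state machine by an inside-out ring construction:
-- grow the spiral from the centre, wrapping each new ring around the marker-swapped twin
-- of the previous spiral (objective: alternative, same cost).

-- ===== PORT A =====
-- literal transliteration of A's while loop; state (str, seq_h, seq_v, horizontal, i)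
def spiralLoopA (str : String) (seq_h seq_v horizontal i : Int) : String :=
  if _h : i ≥ 0 then
    if horizontal == 1 then
      let str1 := str ++ String.ofList (List.replicate i.toNat 'h')
      if seq_h == 0 then
        spiralLoopA (str1 ++ "d") 1 seq_v 0 (i - 1)
      else
        spiralLoopA (str1 ++ "U") 0 seq_v 0 (i - 1)
    else
      let str1 := str ++ String.ofList (List.replicate i.toNat 'v')
      if seq_v == 0 then
        spiralLoopA (str1 ++ "D") seq_h 1 1 i
      else
        spiralLoopA (str1 ++ "u") seq_h 0 1 i
  else
    str
termination_by (2 * i + 2 + (if horizontal == 1 then 0 else 1)).toNat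
decreasing_by all_goals simp_all; omega

def generate_spiral_from_side (n : Int) : String :=
  spiralLoopA "" 0 0 1 (n - 1)

-- ===== PORT B =====
-- one loop iteration of Source B: wrap a new ring around the swapped twin; "v" * (k-1) with
-- k = 0 is the empty string in Python, matched exactly by (k-1).toNat = 0.
def spiralAltStep (state : List String × List String) (k : Int) : List String × List String :=
  ([String.ofList (List.replicate k.toNat 'h'), "d",
    String.ofList (List.replicate (k - 1).toNat 'v'),
    if k == 0 then "" else "D"] ++ state.2,
   [String.ofList (List.replicate k.toNat 'h'), "U",
    String.ofList (List.replicate (k - 1).toNat 'v'),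
    if k == 0 then "" else "u"] ++ state.1)

def generate_spiral_from_side_alt (n : Int) : String :=
  String.join (((PySem.List.pyRange 0 n 1).foldl spiralAltStep ([], [])).1)

-- ===== PRECONDITION & SPEC =====
def Spec_generate_spiral_from_side (n : Int) (out : String) : Prop := out = generate_spiral_from_side_alt n
instance (n : Int) (out : String) : Decidable (Spec_generate_spiral_from_side n out) := by unfold Spec_generate_spiral_from_side; infer_instance

-- ===== CLAIM (what is proved, stated in full; the proofs are below) =====
def Claim_equal_generate_spiral_from_side : Prop := ∀ (n : Int), Dom_generate_spiral_from_side n → Spec_generate_spiral_from_side n (generate_spiral_from_side n)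

-- ===== LEMMAS AND PROOFS =====

-- reference description of the spiral tail: k = remaining side length, p ∈ {0,1} = pair parity
def spiralRef (k : Nat) (p : Int) : String :=
  match k with
  | 0 => if p == 0 then "d" else "U"
  | Nat.succ m =>
      String.ofList (List.replicate (m + 1) 'h') ++ ((if p == 0 then "d" else "U") ++
      (String.ofList (List.replicate m 'v') ++ ((if p == 0 then "D" else "u") ++
      spiralRef m (1 - p))))

theorem spiralLoopA_eq_ref (k : Nat) (p : Int) (hp : p = 0 ∨ p = 1) (str : String) :
    spiralLoopA str p p 1 (k : Int) = str ++ spiralRef k p := by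
  induction k generalizing p str with
  | zero =>
      rcases hp with rfl | rfl <;>
      · rw [spiralLoopA, dif_pos (by omega)]
        simp only [Int.reduceBEq, BEq.rfl, Bool.false_eq_true, if_false, if_true]
        rw [show ((0:Nat):Int) - 1 = -1 by omega, spiralLoopA, dif_neg (by omega)]
        simp [spiralRef]
  | succ m ih =>
      rcases hp with rfl | rfl <;>
      · rw [spiralLoopA, dif_pos (by omega)]
        simp only [Int.reduceBEq, BEq.rfl, Bool.false_eq_true, if_false, if_true]
        rw [show ((m+1 : Nat) : Int) - 1 = (m : Int) by omega,
            spiralLoopA, dif_pos (by omega)]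
        simp only [Int.reduceBEq, BEq.rfl, Bool.false_eq_true, if_false, if_true]
        first
        | rw [ih 1 (Or.inr rfl)]
        | rw [ih 0 (Or.inl rfl)]
        simp [spiralRef, String.append_assoc]

theorem spiralLoopA_neg (str : String) (seq_h seq_v horizontal i : Int) (hi : i < 0) :
    spiralLoopA str seq_h seq_v horizontal i = str := by
  rw [spiralLoopA, dif_neg (by omega)]

theorem strFoldlAppend (l : List String) (init : String) :
    l.foldl (fun r s => r ++ s) init = init ++ String.join l := by
  induction l generalizing init with
  | nil => simp [String.join]
  | cons a l ih =>
      rw [String.join, List.foldl_cons, List.foldl_cons, ih, ih, String.empty_append,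
        String.append_assoc]

theorem strJoinCons (a : String) (l : List String) :
    String.join (a :: l) = a ++ String.join l := by
  rw [String.join, List.foldl_cons, strFoldlAppend, String.empty_append]

-- invariant of B's loop: after m iterations the pair holds the side-m spiral and its swapped twin
theorem strJoinAppend (l1 l2 : List String) :
    String.join (l1 ++ l2) = String.join l1 ++ String.join l2 := by
  induction l1 with
  | nil => simp [String.join, String.empty_append]
  | cons a l ih => rw [List.cons_append, strJoinCons, strJoinCons, ih, String.append_assoc]

-- invariant of B's loop: after m iterations the pair holds the side-m spiral and its swapped twin
theorem altLoop_inv (m : Nat) :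
    String.join (((PySem.List.pyRange 0 (m : Int) 1).foldl spiralAltStep ([], [])).1) =
      (match m with | 0 => "" | Nat.succ m' => spiralRef m' 0) ∧
    String.join (((PySem.List.pyRange 0 (m : Int) 1).foldl spiralAltStep ([], [])).2) =
      (match m with | 0 => "" | Nat.succ m' => spiralRef m' 1) := by
  induction m with
  | zero =>
      rw [PySem.List.pyRange_one_eq_nil (by omega)]
      exact ⟨rfl, rfl⟩
  | succ m ih =>
      obtain ⟨ih1, ih2⟩ := ih
      rw [show ((m + 1 : Nat) : Int) = (m : Int) + 1 by push_cast; ring,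
          PySem.List.pyRange_one_succ_right (a := 0) (b := (m : Int)) (by omega),
          List.foldl_append, List.foldl_cons, List.foldl_nil]
      cases m with
      | zero =>
          constructor <;>
          · rw [spiralAltStep]
            simp only
            rw [strJoinAppend]
            first
              | rw [ih1] | rw [ih2]
            rw [strJoinCons, strJoinCons, strJoinCons, strJoinCons]
            simp only [show ((0:Nat):Int).toNat = 0 from rfl,
              show (((0:Nat):Int) - 1).toNat = 0 by decide]
            simp [spiralRef, String.join]
      | succ m' =>
          constructor <;>
          · rw [spiralAltStep]
            simp only
            rw [strJoinAppend]
            first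
              | rw [ih1] | rw [ih2]
            rw [strJoinCons, strJoinCons, strJoinCons, strJoinCons]
            rw [show (((m' + 1 : Nat) : Int)).toNat = m' + 1 by omega,
                show (((m' + 1 : Nat) : Int) - 1).toNat = m' by omega]
            rw [if_neg (by simp; omega)]
            simp only [spiralRef, String.join, List.foldl_nil]
            norm_num [String.append_assoc]

theorem generate_spiral_from_side_eq (n : Int) :
    generate_spiral_from_side n = generate_spiral_from_side_alt n := by
  unfold generate_spiral_from_side generate_spiral_from_side_alt
  by_cases hpos : 1 ≤ n
  · obtain ⟨m, hm⟩ : ∃ m : Nat, n = ((m : Int) + 1) := ⟨(n - 1).toNat, by omega⟩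
    have hinv := (altLoop_inv (m + 1)).1
    rw [show ((m + 1 : Nat) : Int) = (m : Int) + 1 by push_cast; ring] at hinv
    rw [hm, hinv, show (m : Int) + 1 - 1 = (m : Int) by ring,
        spiralLoopA_eq_ref m 0 (Or.inl rfl), String.empty_append]
  · rw [spiralLoopA_neg _ _ _ _ _ (by omega),
        PySem.List.pyRange_one_eq_nil (by omega)]
    rfl

-- ===== VERDICT (by name: the statement is the Claim_ definition above) =====
theorem generate_spiral_from_side_spec : Claim_equal_generate_spiral_from_side := by
  intro n _
  exact generate_spiral_from_side_eq n
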